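-- pv_equiv track=rewrite | github.com/alambertova/methyltransferases | split_mt2_by_group.py | decide_row_group
-- ===== SOURCE A (Python) =====
-- def decide_row_group(ec_list: list[str], ec_to_group: dict[str, str]) -> str:
--     """
--     Decide which group a row belongs to based on its EC list.
--
--     Rules:
--       - no EC found -> NO_EC
--       - all mapped and all in same group -> that group
--       - some mapped but different groups -> MULTIPLE
--       - none mapped -> UNKNOWN
--       - mix of mapped+unmapped -> MIXED
--     """
--     if not ec_list:
--         return "NO_EC"
--
--     groups = []
--     unknown = 0
--     for ec in ec_list:
--         g = ec_to_group.get(ec)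
--         if g is None:
--             unknown += 1
--         else:
--             groups.append(g)
--
--     if not groups and unknown:
--         return "UNKNOWN"
--     if groups and unknown:
--         return "MIXED"
--
--     gs = set(groups)
--     if len(gs) == 1:
--         return next(iter(gs))
--     return "MULTIPLE"
-- ===== SOURCE B (Python) =====
-- def decide_row_group(ec_list: list[str], ec_to_group: dict[str, str]) -> str:
--     if not ec_list:
--         return "NO_EC"
--     # first mapped group, if any (short-circuits)
--     first = next((ec_to_group[ec] for ec in ec_list if ec in ec_to_group), None)
--     if first is None:
--         return "UNKNOWN"
--     if any(ec not in ec_to_group for ec in ec_list):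
--         return "MIXED"
--     if all(ec_to_group[ec] == first for ec in ec_list):
--         return first
--     return "MULTIPLE"
-- ===== Notes on version B (the rewrite author's own statement) =====
-- stated objective: simpler
-- what changed: Replaces A's accumulating loop (groups list + unknown counter, then a set) by staged short-circuit scans that build no collection: find the first mapped group, then any() for an unmapped EC, then all() that every mapped group equals the first.
import Mathlib
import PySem

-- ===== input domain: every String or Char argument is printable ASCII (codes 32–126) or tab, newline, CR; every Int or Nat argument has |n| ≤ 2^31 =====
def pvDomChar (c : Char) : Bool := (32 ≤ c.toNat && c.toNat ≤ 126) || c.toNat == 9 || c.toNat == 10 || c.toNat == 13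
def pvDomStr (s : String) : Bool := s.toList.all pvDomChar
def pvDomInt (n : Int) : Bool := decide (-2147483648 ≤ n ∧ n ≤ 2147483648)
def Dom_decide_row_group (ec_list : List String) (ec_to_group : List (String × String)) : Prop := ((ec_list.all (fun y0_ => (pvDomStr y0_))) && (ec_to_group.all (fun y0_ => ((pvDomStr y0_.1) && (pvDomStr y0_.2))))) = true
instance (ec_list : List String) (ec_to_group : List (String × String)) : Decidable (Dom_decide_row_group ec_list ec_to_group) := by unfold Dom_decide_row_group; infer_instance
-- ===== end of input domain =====

-- B replaces A's accumulating loop (groups list + unknown counter, then a set) by staged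
-- short-circuit scans that build no collection: simpler, same cost.

-- ===== PORT A =====
def decide_row_group (ec_list : List String) (ec_to_group : List (String × String)) : String :=
  if ec_list = [] then "NO_EC"
  else
    let p : List String × Int := ec_list.foldl (fun acc ec =>
      match (PySem.Dict.mk ec_to_group).get? ec with
      | none => (acc.1, acc.2 + 1)
      | some g => (acc.1 ++ [g], acc.2)) ([], 0)
    if p.1 = [] ∧ p.2 ≠ 0 then "UNKNOWN"
    else if p.1 ≠ [] ∧ p.2 ≠ 0 then "MIXED"
    else
      let gs : PySem.Set String := PySem.Set.ofList p.1
      if gs.length = 1 then gs.headD "" else "MULTIPLE"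

-- ===== PORT B =====
-- next((d[ec] for ec in ec_list if ec in d), None) = first successful lookup = head? of filterMap
def decide_row_group_alt (ec_list : List String) (ec_to_group : List (String × String)) : String :=
  if ec_list = [] then "NO_EC"
  else
    match (ec_list.filterMap (fun ec => (PySem.Dict.mk ec_to_group).get? ec)).head? with
    | none => "UNKNOWN"
    | some first =>
      if ec_list.any (fun ec => !(PySem.Dict.mk ec_to_group).contains ec) then "MIXED"
      else if ec_list.all (fun ec => (PySem.Dict.mk ec_to_group).get? ec == some first) then first
      else "MULTIPLE"

-- ===== PRECONDITION & SPEC =====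
def Spec_decide_row_group (ec_list : List String) (ec_to_group : List (String × String)) (out : String) : Prop := out = decide_row_group_alt ec_list ec_to_group
instance (ec_list : List String) (ec_to_group : List (String × String)) (out : String) : Decidable (Spec_decide_row_group ec_list ec_to_group out) := by unfold Spec_decide_row_group; infer_instance

-- ===== CLAIM (what is proved, stated in full; the proofs are below) =====
def Claim_equal_decide_row_group : Prop := ∀ (ec_list : List String) (ec_to_group : List (String × String)), Dom_decide_row_group ec_list ec_to_group → Spec_decide_row_group ec_list ec_to_group (decide_row_group ec_list ec_to_group)

-- ===== LEMMAS AND PROOFS =====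

-- A's loop, from any accumulator state: appends the mapped groups and counts the unmapped ECs.
theorem pv_fold_spec (g : String → Option String) :
    ∀ (l : List String) (gs0 : List String) (u0 : Int),
    l.foldl (fun acc ec =>
      match g ec with
      | none => (acc.1, acc.2 + 1)
      | some z => (acc.1 ++ [z], acc.2)) (gs0, u0)
    = (gs0 ++ (l.map g).filterMap id, u0 + ((l.map g).count none : Int)) := by
  intro l
  induction l with
  | nil => intro gs0 u0; simp
  | cons x t ih =>
    intro gs0 u0
    simp only [List.foldl_cons, List.map_cons]
    cases hx : g x with
    | none => simp [ih]; ring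
    | some z => simp [ih]

-- folding Set.add over elements already present changes nothing
theorem pv_foldl_add_const (f : String) :
    ∀ (t : List String), (∀ y ∈ t, y = f) → List.foldl PySem.Set.add [f] t = [f] := by
  intro t
  induction t with
  | nil => intro _; rfl
  | cons y s ih =>
    intro h
    have hy : y = f := h y (by simp)
    have : PySem.Set.add [f] y = [f] := by
      simp [PySem.Set.add, hy, PySem.Set.contains]
    simp only [List.foldl_cons, this]
    exact ih (fun z hz => h z (by simp [hz]))

-- ===== MAIN EQUIVALENCE =====
set_option maxHeartbeats 1000000 in
theorem decide_row_group_spec_aux (ec_list : List String) (ec_to_group : List (String × String)) :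
    decide_row_group ec_list ec_to_group = decide_row_group_alt ec_list ec_to_group := by
  unfold decide_row_group decide_row_group_alt
  by_cases hnil : ec_list = []
  · simp [hnil]
  · simp only [if_neg hnil]
    set g : String → Option String := fun ec => (PySem.Dict.mk ec_to_group).get? ec with hg
    set ms : List (Option String) := ec_list.map g with hms
    have hmsne : ms ≠ [] := by simp [hms, hnil]
    rw [pv_fold_spec g ec_list [] 0]
    simp only [List.nil_append, Int.zero_add]
    have hfm : ec_list.filterMap (fun ec => (PySem.Dict.mk ec_to_group).get? ec)
        = ms.filterMap id := by
      rw [hms, List.filterMap_map]; rfl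
    rw [hfm]
    set gs : List String := ms.filterMap id with hgs
    have hCnt : ((List.count none ms : Int)) ≠ 0 ↔ none ∈ ms := by
      rw [← List.count_pos_iff (l := ms) (a := none)]; omega
    have hAny : (ec_list.any (fun ec => !(PySem.Dict.mk ec_to_group).contains ec)) = true
        ↔ none ∈ ms := by
      rw [hms, List.any_eq_true]
      constructor
      · rintro ⟨ec, hec, hb⟩
        refine List.mem_map.mpr ⟨ec, hec, ?_⟩
        show (PySem.Dict.mk ec_to_group).get? ec = none
        rw [PySem.Dict.get?_eq_none_iff_contains]
        simpa using hb
      · intro hmem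
        obtain ⟨ec, hec, hge⟩ := List.mem_map.mp hmem
        refine ⟨ec, hec, ?_⟩
        have h2 : (PySem.Dict.mk ec_to_group).get? ec = none := hge
        have h3 := (PySem.Dict.get?_eq_none_iff_contains _ _).mp h2
        simp [h3]
    cases hgsc : gs with
    | nil =>
      -- no EC mapped: gs = [] and ms nonempty all-none, so count ≠ 0 and head? = none
      have hall : ∀ x ∈ ms, x = none := by
        intro x hx
        cases x with
        | none => rfl
        | some z =>
          exfalso
          have : z ∈ gs := by
            rw [hgs]; exact List.mem_filterMap.mpr ⟨some z, hx, rfl⟩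
          simp [hgsc] at this
      have hmem : none ∈ ms := by
        obtain ⟨y, t, hyt⟩ := List.exists_cons_of_ne_nil hmsne
        have hy : y ∈ ms := by rw [hyt]; simp
        exact hall y hy ▸ hy
      have hcnt : ((List.count none ms : Int)) ≠ 0 := hCnt.mpr hmem
      have hcnt' : ¬ List.count none (List.map g ec_list) = 0 := by
        rw [← hms]; exact_mod_cast hcnt
      simp [hgsc, hcnt']
    | cons f t =>
      simp only [hgsc, List.head?_cons]
      by_cases hu : ((List.count none ms : Int)) = 0
      · -- all mapped
        have hnm : none ∉ ms := fun hm => (hCnt.mpr hm) hu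
        have hcnt0 : List.count none (List.map g ec_list) = 0 := by
          rw [← hms]; exact_mod_cast hu
        have hMapped : ∀ x ∈ ec_list, ∃ y, (x, y) ∈ ec_to_group := by
          intro x hx
          have hxm : g x ∈ ms := by rw [hms]; exact List.mem_map.mpr ⟨x, hx, rfl⟩
          cases hge : g x with
          | none => exact absurd (hge ▸ hxm) hnm
          | some z =>
            have hg2 : (PySem.Dict.mk ec_to_group).get? x = some z := hge
            cases hb : (PySem.Dict.mk ec_to_group).contains x with
            | false =>
              have h2 := (PySem.Dict.get?_eq_none_iff_contains
                (PySem.Dict.mk ec_to_group) x).mpr hb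
              rw [hg2] at h2
              exact absurd h2 (by simp)
            | true => simpa using hb
        have hAll : (ec_list.all (fun ec => (PySem.Dict.mk ec_to_group).get? ec == some f)) = true
            ↔ ∀ y ∈ gs, y = f := by
          rw [List.all_eq_true]
          constructor
          · intro h y hy
            obtain ⟨x, hx, hxy⟩ := List.mem_filterMap.mp (hgs ▸ hy)
            obtain ⟨ec, hec, hge⟩ := List.mem_map.mp (hms ▸ hx)
            have h1 : (PySem.Dict.mk ec_to_group).get? ec = some f := by
              simpa using h ec hec
            have h1' : g ec = some f := h1
            rw [hge] at h1'
            rw [h1'] at hxy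
            simpa using hxy.symm
          · intro h ec hec
            have hxm : g ec ∈ ms := by rw [hms]; exact List.mem_map.mpr ⟨ec, hec, rfl⟩
            cases hge : g ec with
            | none => exact absurd (hge ▸ hxm) hnm
            | some z =>
              have hz : z ∈ gs := by
                rw [hgs]; exact List.mem_filterMap.mpr ⟨g ec, hxm, by rw [hge]; rfl⟩
              have hzf : z = f := h z hz
              have h2 : (PySem.Dict.mk ec_to_group).get? ec = some z := hge
              simp [h2, hzf]
        by_cases hone : ∀ y ∈ t, y = f
        · have hsets : PySem.Set.ofList (f :: t) = [f] := by
            rw [PySem.Set.ofList]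
            show List.foldl PySem.Set.add (PySem.Set.add [] f) t = [f]
            have hadd : PySem.Set.add ([] : List String) f = [f] := rfl
            rw [hadd]
            exact pv_foldl_add_const f t hone
          have hallb : (ec_list.all (fun ec => (PySem.Dict.mk ec_to_group).get? ec == some f)) = true := by
            rw [hAll]; intro y hy
            rw [hgsc] at hy
            rcases List.mem_cons.mp hy with h | h
            · exact h
            · exact hone y h
          have hAllP : ∀ x ∈ ec_list, (PySem.Dict.mk ec_to_group).get? x = some f := by
            intro x hx
            simpa using List.all_eq_true.mp hallb x hx
          simp [hsets, hcnt0]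
          have hanyf : ¬ ((ec_list.any fun ec => !ec_to_group.any fun p => p.1 == ec) = true) :=
            fun hcon => hnm (hAny.mp hcon)
          rw [if_neg hanyf, if_pos hAllP]
        · -- at least two distinct groups
          push_neg at hone
          obtain ⟨y, hy, hyne⟩ := hone
          have hlen : (PySem.Set.ofList (f :: t)).length ≠ 1 := by
            intro h1
            obtain ⟨b, hb⟩ := List.length_eq_one_iff.mp h1
            have hf : f ∈ PySem.Set.ofList (f :: t) := (PySem.Set.mem_ofList _ _).mpr (by simp)
            have hyy : y ∈ PySem.Set.ofList (f :: t) := (PySem.Set.mem_ofList _ _).mpr (by simp [hy])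
            rw [hb] at hf hyy
            simp at hf hyy
            exact hyne (hyy.trans hf.symm)
          have hallb : (ec_list.all (fun ec => (PySem.Dict.mk ec_to_group).get? ec == some f)) = false := by
            rw [← Bool.not_eq_true]; intro hc
            exact hyne (hAll.mp hc y (by rw [hgsc]; simp [hy]))
          have hNAllP : ¬ ∀ x ∈ ec_list, (PySem.Dict.mk ec_to_group).get? x = some f := by
            intro hall
            rw [← Bool.not_eq_true] at hallb
            exact hallb (List.all_eq_true.mpr (fun x hx => by simp [hall x hx]))
          simp [hlen, hcnt0, hNAllP]
          exact hMapped
      · -- mixed: some mapped (gs ≠ []) and some unmapped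
        have hmem : none ∈ ms := by
          by_contra hn
          exact hu (by simp [List.count_eq_zero.mpr hn])
        have hanyt : (ec_list.any (fun ec => !(PySem.Dict.mk ec_to_group).contains ec)) = true :=
          hAny.mpr hmem
        have hcnt0 : ¬ List.count none (List.map g ec_list) = 0 := by
          rw [← hms]; exact_mod_cast hu
        have hUnmapped : ¬ ∀ x ∈ ec_list, ∃ y, (x, y) ∈ ec_to_group := by
          intro hall
          obtain ⟨ec, hec, hge⟩ := List.mem_map.mp (hms ▸ hmem)
          obtain ⟨y, hy⟩ := hall ec hec
          have hcf : (PySem.Dict.mk ec_to_group).contains ec = false :=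
            (PySem.Dict.get?_eq_none_iff_contains _ _).mp hge
          have : (PySem.Dict.mk ec_to_group).contains ec = true := by
            simp only [PySem.Dict.contains]
            exact List.any_eq_true.mpr ⟨(ec, y), hy, by simp⟩
          simp [this] at hcf
        simp [hcnt0, hUnmapped]

-- ===== VERDICT (by name: the statement is the Claim_ definition above) =====
theorem decide_row_group_spec : Claim_equal_decide_row_group := by
  intro ec_list ec_to_group _
  exact decide_row_group_spec_aux ec_list ec_to_group
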